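-- pv_equiv track=rewrite | github.com/frankterpo/tech_eu_london_2026 | cli/src/agent/platform_extrapolation.py | _candidate_add_path
-- ===== SOURCE A (Python) =====
-- from typing import Any, Dict, List, Optional
--
-- def _candidate_add_path(prompt: str, paths: List[str]) -> str:
--     p = prompt.lower()
--     sales_needles = ["/desktop/sale/add", "/desktop/sale/new"]
--     purchase_needles = [
--         "/desktop/purchase/add",
--         "/desktop/purchase/new",
--         "/desktop/purchase",
--     ]
--     target = purchase_needles if "purchase" in p else sales_needles
--     lowered = [(x, x.lower()) for x in paths]
--     for needle in target:
--         for raw, low in lowered: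
--             if needle in low:
--                 return raw
--     for raw, low in lowered:
--         if "/desktop/" in low and ("add" in low or "new" in low) and "edit" not in low:
--             return raw
--     if "purchase" in p:
--         return "/desktop/purchase/add"
--     return "/desktop/sale/add"
-- ===== SOURCE B (Python) =====
-- from typing import List
--
-- def _candidate_add_path(prompt: str, paths: List[str]) -> str:
--     p = prompt.lower()
--     sales_needles = ["/desktop/sale/add", "/desktop/sale/new"]
--     purchase_needles = [
--         "/desktop/purchase/add",
--         "/desktop/purchase/new",
--         "/desktop/purchase",
--     ]
--     target = purchase_needles if "purchase" in p else sales_needles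
--     best_rank = len(target)
--     best = None
--     for raw in paths:
--         low = raw.lower()
--         rank = next((i for i, n in enumerate(target) if n in low), len(target))
--         if rank < best_rank:
--             best_rank = rank
--             best = raw
--     if best is not None:
--         return best
--     for raw in paths:
--         low = raw.lower()
--         if "/desktop/" in low and ("add" in low or "new" in low) and "edit" not in low:
--             return raw
--     if "purchase" in p:
--         return "/desktop/purchase/add"
--     return "/desktop/sale/add"
-- ===== Notes on version B (the rewrite author's own statement) =====
-- stated objective: alternative
-- what changed: Replaced A's needle-outer nested rescans of the path list (one full pass per needle, then the fallback) with a single pass over the paths that computes each path's best-needle rank and keeps the first path with the strictly smallest rank.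
import Mathlib
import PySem

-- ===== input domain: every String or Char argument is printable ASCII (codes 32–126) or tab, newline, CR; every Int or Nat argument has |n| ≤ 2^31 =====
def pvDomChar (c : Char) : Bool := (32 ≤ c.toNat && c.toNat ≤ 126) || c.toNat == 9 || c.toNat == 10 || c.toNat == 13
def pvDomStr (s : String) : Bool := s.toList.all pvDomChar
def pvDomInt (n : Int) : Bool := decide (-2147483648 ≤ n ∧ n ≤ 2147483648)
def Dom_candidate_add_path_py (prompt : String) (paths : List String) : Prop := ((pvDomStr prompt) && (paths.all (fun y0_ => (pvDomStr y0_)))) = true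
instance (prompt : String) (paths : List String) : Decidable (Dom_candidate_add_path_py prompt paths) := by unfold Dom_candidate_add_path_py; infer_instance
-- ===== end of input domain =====

-- B replaces A's needle-outer repeated scans of the path list by one pass over the paths
-- keeping the first path of strictly smallest needle rank (objective: alternative decomposition).

-- ===== PORT A =====
-- inner loop: for raw, low in lowered: if needle in low: return raw
def pyFindNeedle (needle : String) : List (String × String) → Option String
  | [] => none
  | (raw, low) :: rest =>
      if PySem.Str.isIn needle low then some raw else pyFindNeedle needle rest

-- outer loop: for needle in target: …
def pySearch (target : List String) (lowered : List (String × String)) : Option String :=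
  match target with
  | [] => none
  | n :: rest =>
      match pyFindNeedle n lowered with
      | some r => some r
      | none => pySearch rest lowered

-- generic fallback loop of A (over the precomputed lowered pairs)
def pyFallback : List (String × String) → Option String
  | [] => none
  | (raw, low) :: rest =>
      if PySem.Str.isIn "/desktop/" low &&
         (PySem.Str.isIn "add" low || PySem.Str.isIn "new" low) &&
         !PySem.Str.isIn "edit" low then some raw
      else pyFallback rest

def candidate_add_path_py (prompt : String) (paths : List String) : String :=
  let p := PySem.Str.lower prompt
  let sales_needles := ["/desktop/sale/add", "/desktop/sale/new"]
  let purchase_needles := ["/desktop/purchase/add", "/desktop/purchase/new", "/desktop/purchase"]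
  let target := if PySem.Str.isIn "purchase" p then purchase_needles else sales_needles
  let lowered := paths.map (fun x => (x, PySem.Str.lower x))
  match pySearch target lowered with
  | some r => r
  | none =>
    match pyFallback lowered with
    | some r => r
    | none => if PySem.Str.isIn "purchase" p then "/desktop/purchase/add" else "/desktop/sale/add"

-- ===== PORT B =====
-- rank = next((i for i, n in enumerate(target) if n in low), len(target))
def altRank (target : List String) (low : String) : Nat :=
  match target with
  | [] => 0
  | n :: rest => if PySem.Str.isIn n low then 0 else altRank rest low + 1

-- the single pass: state (best_rank, best), strictly-smaller updates only
def altLoop (target : List String) : List String → Nat × Option String → Nat × Option String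
  | [], acc => acc
  | raw :: rest, (br, b) =>
      let low := PySem.Str.lower raw
      let q := altRank target low
      if q < br then altLoop target rest (q, some raw) else altLoop target rest (br, b)

-- B's fallback loop (recomputes low per path)
def altFallback : List String → Option String
  | [] => none
  | raw :: rest =>
      let low := PySem.Str.lower raw
      if PySem.Str.isIn "/desktop/" low &&
         (PySem.Str.isIn "add" low || PySem.Str.isIn "new" low) &&
         !PySem.Str.isIn "edit" low then some raw
      else altFallback rest

def candidate_add_path_py_alt (prompt : String) (paths : List String) : String :=
  let p := PySem.Str.lower prompt
  let sales_needles := ["/desktop/sale/add", "/desktop/sale/new"]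
  let purchase_needles := ["/desktop/purchase/add", "/desktop/purchase/new", "/desktop/purchase"]
  let target := if PySem.Str.isIn "purchase" p then purchase_needles else sales_needles
  match (altLoop target paths (target.length, none)).2 with
  | some b => b
  | none =>
    match altFallback paths with
    | some r => r
    | none => if PySem.Str.isIn "purchase" p then "/desktop/purchase/add" else "/desktop/sale/add"

-- ===== PRECONDITION & SPEC =====
def Spec_candidate_add_path_py (prompt : String) (paths : List String) (out : String) : Prop := out = candidate_add_path_py_alt prompt paths
instance (prompt : String) (paths : List String) (out : String) : Decidable (Spec_candidate_add_path_py prompt paths out) := by unfold Spec_candidate_add_path_py; infer_instance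

-- ===== CLAIM (what is proved, stated in full; the proofs are below) =====
def Claim_equal_candidate_add_path_py : Prop := ∀ (prompt : String) (paths : List String), Dom_candidate_add_path_py prompt paths → Spec_candidate_add_path_py prompt paths (candidate_add_path_py prompt paths)

-- ===== LEMMAS AND PROOFS =====

-- A's inner scan of the lowered pairs is find? over the raw paths
theorem pyFindNeedle_map (n : String) (paths : List String) :
    pyFindNeedle n (paths.map (fun x => (x, PySem.Str.lower x))) =
      paths.find? (fun x => PySem.Str.isIn n (PySem.Str.lower x)) := by
  induction paths with
  | nil => rfl
  | cons raw rest ih =>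
      simp only [List.map_cons, pyFindNeedle, List.find?]
      cases h : PySem.Chars.isIn n.toList (PySem.Chars.lower raw.toList) <;> simp [pysem, h, ih]

-- with best_rank = 0 the loop never updates again
theorem altLoop_zero (target : List String) (paths : List String) (b : Option String) :
    altLoop target paths (0, b) = (0, b) := by
  induction paths with
  | nil => rfl
  | cons raw rest ih => simp [altLoop, ih]

-- if some path has rank 0, the loop returns the first such path
theorem altLoop_rank_zero (target : List String) :
    ∀ (paths : List String) (k : Nat) (b : Option String), 0 < k →
      (∃ x ∈ paths, altRank target (PySem.Str.lower x) = 0) →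
      (altLoop target paths (k, b)).2 =
        paths.find? (fun x => altRank target (PySem.Str.lower x) == 0) := by
  intro paths
  induction paths with
  | nil => intro k b hk hex; rcases hex with ⟨x, hx, _⟩; cases hx
  | cons raw rest ih =>
      intro k b hk hex
      simp only [altLoop, List.find?]
      by_cases h : altRank target (PySem.Str.lower raw) = 0
      · simp [h, hk, altLoop_zero]
      · have hfalse : (altRank target (PySem.Str.lower raw) == 0) = false := by
          simp [h]
        rw [hfalse]
        have hex' : ∃ x ∈ rest, altRank target (PySem.Str.lower x) = 0 := by
          rcases hex with ⟨x, hx, hx0⟩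
          cases hx with
          | head => exact absurd hx0 h
          | tail _ hmem => exact ⟨x, hmem, hx0⟩
        by_cases hlt : altRank target (PySem.Str.lower raw) < k
        · simp only [hlt, if_true]
          exact ih _ _ (Nat.pos_of_ne_zero h) hex'
        · simp only [hlt, if_false]
          exact ih _ _ hk hex'

-- if no path contains the first needle, the head needle only shifts every rank by one
theorem altLoop_shift (n : String) (rest : List String) :
    ∀ (paths : List String) (k : Nat) (b : Option String),
      (∀ x ∈ paths, PySem.Str.isIn n (PySem.Str.lower x) = false) →
      (altLoop (n :: rest) paths (k + 1, b)).2 = (altLoop rest paths (k, b)).2 := by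
  intro paths
  induction paths with
  | nil => intro k b _; rfl
  | cons raw tail ih =>
      intro k b hno
      have hraw : PySem.Str.isIn n (PySem.Str.lower raw) = false := hno raw (.head _)
      have htail : ∀ x ∈ tail, PySem.Str.isIn n (PySem.Str.lower x) = false :=
        fun x hx => hno x (.tail _ hx)
      simp only [altLoop, altRank, hraw, Bool.false_eq_true, if_false]
      by_cases hlt : altRank rest (PySem.Str.lower raw) < k
      · simp only [Nat.add_lt_add_iff_right.mpr hlt, hlt, if_true]
        exact ih _ _ htail
      · have : ¬ altRank rest (PySem.Str.lower raw) + 1 < k + 1 := by omega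
        simp only [this, hlt, if_false]
        exact ih _ _ htail

-- the single pass computes exactly A's needle-outer search
set_option maxHeartbeats 1000000 in
theorem altLoop_eq_pySearch :
    ∀ (target : List String) (paths : List String),
      (altLoop target paths (target.length, none)).2 =
        pySearch target (paths.map (fun x => (x, PySem.Str.lower x))) := by
  intro target
  induction target with
  | nil => intro paths; simp [pySearch, altLoop_zero]
  | cons n rest ih =>
      intro paths
      rw [pySearch, pyFindNeedle_map]
      by_cases hex : ∃ x ∈ paths, PySem.Str.isIn n (PySem.Str.lower x) = true
      · have hz : ∃ x ∈ paths, altRank (n :: rest) (PySem.Str.lower x) = 0 := by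
          rcases hex with ⟨x, hx, hin⟩
          simp only [pysem] at hin
          exact ⟨x, hx, by simp [altRank, PySem.Chars.isIn_iff_infix, hin]⟩
        rw [altLoop_rank_zero (n :: rest) paths (n :: rest).length none (by simp) hz]
        have hpred : (fun x => altRank (n :: rest) (PySem.Str.lower x) == 0) =
            (fun x => PySem.Str.isIn n (PySem.Str.lower x)) := by
          funext x
          simp only [altRank, pysem]
          cases hc : PySem.Chars.isIn n.toList (PySem.Chars.lower x.toList) <;> simp_all [PySem.Chars.isIn_eq_false_iff, PySem.Chars.isIn_iff_infix]
        rw [hpred]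
        rcases hex with ⟨x, hx, hin⟩
        have hsome : (paths.find? (fun x => PySem.Str.isIn n (PySem.Str.lower x))).isSome :=
          List.find?_isSome.mpr ⟨x, hx, hin⟩
        rcases Option.isSome_iff_exists.mp hsome with ⟨r, hr⟩
        rw [hr]
      · push Not at hex
        have hno : ∀ x ∈ paths, PySem.Str.isIn n (PySem.Str.lower x) = false := by
          intro x hx; exact Bool.eq_false_iff.mpr (hex x hx)
        have hnone : paths.find? (fun x => PySem.Str.isIn n (PySem.Str.lower x)) = none :=
          List.find?_eq_none.mpr (fun x hx => by have := hno x hx; simp only [pysem] at this; simp [PySem.Chars.isIn_eq_false_iff, this])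
        rw [hnone]
        show (altLoop (n :: rest) paths (rest.length + 1, none)).2 = _
        rw [altLoop_shift n rest paths rest.length none hno, ih]

-- the two fallback loops agree
theorem fallback_eq (paths : List String) :
    pyFallback (paths.map (fun x => (x, PySem.Str.lower x))) = altFallback paths := by
  induction paths with
  | nil => rfl
  | cons raw rest ih =>
      simp only [List.map_cons, pyFallback, altFallback]
      split_ifs <;> simp [ih]

-- ===== VERDICT (by name: the statement is the Claim_ definition above) =====
theorem candidate_add_path_py_spec : Claim_equal_candidate_add_path_py := by
  intro prompt paths _
  show candidate_add_path_py prompt paths = candidate_add_path_py_alt prompt paths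
  simp only [candidate_add_path_py, candidate_add_path_py_alt]
  rw [← altLoop_eq_pySearch, fallback_eq]
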